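-- pv_equiv track=rewrite | github.com/Ayo-Awe/alx-backend | 0x01-caching/100-lfu_cache.py | lowest_key_by_frequency_and_rank
-- ===== SOURCE A (Python) =====
-- from typing import Dict, Tuple
--
-- def lowest_key_by_frequency_and_rank(dic: Dict[any, Tuple[int, int]]):
--     """
--     retrieves the key from a dictionary of
--     tuples (frequency, rank) with the lowest frequency
--     and rank
--     """
--
--     if dic is None or len(dic) == 0:
--         return None
--
--     new_tup = [(key, data[0], data[1]) for key, data in dic.items()]
--
--     sorted_data = sorted(new_tup, key=lambda x: x[1])
--     lowest_frequency = sorted_data[0][1]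
--     keys_with_lowest_frequency = filter(
--         lambda x: x[1] == lowest_frequency, sorted_data)
--     sorted_data = sorted(keys_with_lowest_frequency, key=lambda x: x[2])
--
--     return sorted_data[0][0]
-- ===== SOURCE B (Python) =====
-- def lowest_key_by_frequency_and_rank(dic):
--     """
--     retrieves the key from a dictionary of
--     tuples (frequency, rank) with the lowest frequency
--     and rank
--     """
--
--     if dic is None or len(dic) == 0:
--         return None
--
--     min_freq = None
--     for freq, _ in dic.values():
--         if min_freq is None or freq < min_freq:
--             min_freq = freq
--
--     best_key = None
--     best_rank = None
--     for key, (freq, rank) in dic.items():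
--         if freq == min_freq and (best_rank is None or rank < best_rank):
--             best_key, best_rank = key, rank
--     return best_key
-- ===== Notes on version B (the rewrite author's own statement) =====
-- stated objective: alternative
-- what changed: Replaces A's sort-by-frequency, filter, sort-by-rank pipeline with two plain linear scans: one computing the minimum frequency, one keeping the first entry of that frequency class with the strictly smallest rank.
import Mathlib
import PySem

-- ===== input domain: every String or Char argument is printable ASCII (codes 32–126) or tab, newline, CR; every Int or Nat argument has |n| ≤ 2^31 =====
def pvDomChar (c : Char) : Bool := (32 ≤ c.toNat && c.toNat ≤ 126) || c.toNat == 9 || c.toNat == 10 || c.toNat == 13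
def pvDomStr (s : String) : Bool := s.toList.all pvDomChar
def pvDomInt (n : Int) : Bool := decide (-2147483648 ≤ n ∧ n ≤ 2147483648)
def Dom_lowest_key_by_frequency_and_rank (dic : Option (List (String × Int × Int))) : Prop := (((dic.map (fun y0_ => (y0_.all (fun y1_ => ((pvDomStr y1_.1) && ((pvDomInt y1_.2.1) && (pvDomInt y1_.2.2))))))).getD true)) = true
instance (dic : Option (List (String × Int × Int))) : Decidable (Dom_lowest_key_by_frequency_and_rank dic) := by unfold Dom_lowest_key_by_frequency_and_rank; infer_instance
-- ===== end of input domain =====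

-- B replaces A's sort-filter-sort with two linear scans (min frequency, then first best rank); equal return values, no claim about speed beyond the measured label.

-- ===== PORT A =====
def lowest_key_by_frequency_and_rank (dic : Option (List (String × Int × Int))) : Option String :=
  match dic with
  | none => none
  | some l =>
    if l.length = 0 then none
    else
      let new_tup := l.map (fun kd => (kd.1, kd.2.1, kd.2.2))
      let sorted_data := PySem.List.sorted new_tup (fun x => x.2.1) false
      match PySem.List.pyGet? sorted_data 0 with
      | none => none   -- unreachable: the list is nonempty
      | some m =>
        let lowest_frequency := m.2.1
        let keys_with_lowest_frequency := sorted_data.filter (fun x => x.2.1 == lowest_frequency)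
        let sorted_data2 := PySem.List.sorted keys_with_lowest_frequency (fun x => x.2.2) false
        (PySem.List.pyGet? sorted_data2 0).map (fun x => x.1)

-- ===== PORT B =====
def lowest_key_by_frequency_and_rank_alt (dic : Option (List (String × Int × Int))) : Option String :=
  match dic with
  | none => none
  | some l =>
    if l.length = 0 then none
    else
      let min_freq := l.foldl (fun (acc : Option Int) kv =>
        match acc with
        | none => some kv.2.1
        | some m => if kv.2.1 < m then some kv.2.1 else acc) none
      let best := l.foldl (fun (acc : Option (String × Int)) kv =>
        if (some kv.2.1 == min_freq &&
            (match acc with | none => true | some b => decide (kv.2.2 < b.2))) then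
          some (kv.1, kv.2.2)
        else acc) none
      best.map (fun b => b.1)

-- ===== PRECONDITION & SPEC =====
def Spec_lowest_key_by_frequency_and_rank (dic : Option (List (String × Int × Int))) (out : Option String) : Prop := out = lowest_key_by_frequency_and_rank_alt dic
instance (dic : Option (List (String × Int × Int))) (out : Option String) : Decidable (Spec_lowest_key_by_frequency_and_rank dic out) := by unfold Spec_lowest_key_by_frequency_and_rank; infer_instance

-- ===== CLAIM (what is proved, stated in full; the proofs are below) =====
def Claim_equal_lowest_key_by_frequency_and_rank : Prop := ∀ (dic : Option (List (String × Int × Int))), Dom_lowest_key_by_frequency_and_rank dic → Spec_lowest_key_by_frequency_and_rank dic (lowest_key_by_frequency_and_rank dic)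

-- ===== LEMMAS AND PROOFS =====

-- insertBy (with a key into Int) keeps a key-sorted accumulator key-sorted
theorem pv_insertBy_pairwise {α : Type} (k : α → Int) (x : α) (acc : List α)
    (h : acc.Pairwise (fun a b => k a ≤ k b)) :
    (PySem.List.insertBy (fun a b => decide (k a < k b)) x acc).Pairwise (fun a b => k a ≤ k b) := by
  induction acc with
  | nil => simp [PySem.List.insertBy]
  | cons y ys ih =>
    rcases List.pairwise_cons.mp h with ⟨hy, hys⟩
    by_cases hlt : k x < k y
    · simp only [PySem.List.insertBy, hlt, decide_true, if_true]
      refine List.pairwise_cons.mpr ⟨?_, h⟩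
      intro z hz
      rcases List.mem_cons.mp hz with rfl | hz
      · exact le_of_lt hlt
      · exact le_trans (le_of_lt hlt) (hy z hz)
    · simp only [PySem.List.insertBy, hlt, decide_false]
      refine List.pairwise_cons.mpr ⟨?_, ih hys⟩
      intro z hz
      rcases (PySem.List.mem_insertBy _ x z ys).mp hz with rfl | hz
      · exact le_of_not_gt hlt
      · exact hy z hz

-- stability step: filtering one key-class out of an insertion into a sorted accumulator
theorem pv_filter_insertBy {α : Type} (k : α → Int) (v : Int) (x : α) (acc : List α)
    (h : acc.Pairwise (fun a b => k a ≤ k b)) :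
    (PySem.List.insertBy (fun a b => decide (k a < k b)) x acc).filter (fun y => k y == v) =
      (if k x == v then acc.filter (fun y => k y == v) ++ [x]
       else acc.filter (fun y => k y == v)) := by
  induction acc with
  | nil => by_cases hv : k x = v <;> simp [PySem.List.insertBy, hv]
  | cons y ys ih =>
    rcases List.pairwise_cons.mp h with ⟨hy, hys⟩
    by_cases hlt : k x < k y
    · -- x is inserted in front; nothing at or past y can have key v when k x = v
      simp only [PySem.List.insertBy, hlt, decide_true, if_true]
      by_cases hv : k x = v
      · have hclass : (y :: ys).filter (fun y => k y == v) = [] := by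
          rw [List.filter_eq_nil_iff]
          intro z hz
          have : k y ≤ k z := by
            rcases List.mem_cons.mp hz with rfl | hz
            · exact le_refl _
            · exact hy z hz
          have : v < k z := lt_of_lt_of_le (hv ▸ hlt) this
          simp [ne_of_gt this]
        simp [hclass, hv]
      · have hxv : (k x == v) = false := by simp [hv]
        simp [List.filter_cons, hxv]
    · simp only [PySem.List.insertBy, hlt, decide_false, Bool.false_eq_true, if_false]
      rw [List.filter_cons, List.filter_cons, ih hys]
      by_cases hxv : k x = v <;> by_cases hyv : k y = v <;> simp [hxv, hyv]
  
-- stability over the whole fold of insertions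
theorem pv_filter_foldl_ins {α : Type} (k : α → Int) (v : Int) :
    ∀ (l acc : List α), acc.Pairwise (fun a b => k a ≤ k b) →
    (l.foldl (fun acc x => PySem.List.insertBy (fun a b => decide (k a < k b)) x acc) acc).filter
        (fun y => k y == v) =
      acc.filter (fun y => k y == v) ++ l.filter (fun y => k y == v) := by
  intro l
  induction l with
  | nil => intro acc _; simp
  | cons x t ih =>
    intro acc hacc
    have hacc' := pv_insertBy_pairwise k x acc hacc
    rw [List.foldl_cons, ih _ hacc', pv_filter_insertBy k v x acc hacc, List.filter_cons]
    by_cases hxv : k x = v <;> simp [hxv]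

-- STABILITY of PySem's sort: filtering one key-class commutes with sorting
theorem pv_filter_sorted {α : Type} (k : α → Int) (v : Int) (l : List α) :
    (PySem.List.sorted l k false).filter (fun y => k y == v) = l.filter (fun y => k y == v) := by
  rw [PySem.List.sorted_eq_foldl_insertBy]
  simpa using pv_filter_foldl_ins k v l [] (by simp)

-- B's first loop, stripped of its Option wrapper
theorem pv_optfold (t : List (String × Int × Int)) :
    ∀ (m : Int), t.foldl (fun (acc : Option Int) kv =>
        match acc with
        | none => some kv.2.1
        | some m => if kv.2.1 < m then some kv.2.1 else acc) (some m) =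
      some (t.foldl (fun m kv => if kv.2.1 < m then kv.2.1 else m) m) := by
  induction t with
  | nil => intro m; rfl
  | cons x t ih => intro m; by_cases h : x.2.1 < m <;> simp [h, ih]

-- the pure running minimum is an attained lower bound
theorem pv_minfold (t : List (String × Int × Int)) :
    ∀ (m : Int),
      ((t.foldl (fun m kv => if kv.2.1 < m then kv.2.1 else m) m) = m ∨
        ∃ y ∈ t, (t.foldl (fun m kv => if kv.2.1 < m then kv.2.1 else m) m) = y.2.1) ∧
      (t.foldl (fun m kv => if kv.2.1 < m then kv.2.1 else m) m) ≤ m ∧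
      ∀ y ∈ t, (t.foldl (fun m kv => if kv.2.1 < m then kv.2.1 else m) m) ≤ y.2.1 := by
  induction t with
  | nil => intro m; simp
  | cons x t ih =>
    intro m
    by_cases h : x.2.1 < m
    · rcases ih x.2.1 with ⟨hmem, hle, hall⟩
      refine ⟨?_, ?_, ?_⟩
      · rcases hmem with he | ⟨y, hy, he⟩
        · exact Or.inr ⟨x, by simp, by simpa [h] using he⟩
        · exact Or.inr ⟨y, by simp [hy], by simpa [h] using he⟩
      · simpa [h] using le_trans hle (le_of_lt h)
      · intro y hy
        rcases List.mem_cons.mp hy with rfl | hy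
        · simpa [h] using hle
        · simpa [h] using hall y hy
    · rcases ih m with ⟨hmem, hle, hall⟩
      refine ⟨?_, ?_, ?_⟩
      · rcases hmem with he | ⟨y, hy, he⟩
        · exact Or.inl (by simpa [h] using he)
        · exact Or.inr ⟨y, by simp [hy], by simpa [h] using he⟩
      · simpa [h] using hle
      · intro y hy
        rcases List.mem_cons.mp hy with rfl | hy
        · exact le_trans (by simpa [h] using hle) (le_of_not_gt h)
        · simpa [h] using hall y hy

-- B's second loop restricted to the entries of the minimal frequency class
theorem pv_fold2_filter (f : Int) :
    ∀ (l : List (String × Int × Int)) (acc : Option (String × Int)),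
      l.foldl (fun (acc : Option (String × Int)) kv =>
        if (some kv.2.1 == some f &&
            (match acc with | none => true | some b => decide (kv.2.2 < b.2))) then
          some (kv.1, kv.2.2)
        else acc) acc =
      (l.filter (fun x => x.2.1 == f)).foldl (fun (acc : Option (String × Int)) kv =>
        if (match acc with | none => true | some b => decide (kv.2.2 < b.2)) then
          some (kv.1, kv.2.2)
        else acc) acc := by
  intro l
  induction l with
  | nil => intro acc; rfl
  | cons x t ih =>
    intro acc
    by_cases hf : x.2.1 = f
    · rw [List.filter_cons, if_pos (by simp [hf]), List.foldl_cons, List.foldl_cons]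
      have hM : (some x.2.1 == some f &&
          (match acc with | none => true | some b => decide (x.2.2 < b.2))) =
          (match acc with | none => true | some b => decide (x.2.2 < b.2)) := by
        simp [hf]
      rw [hM]
      exact ih _
    · rw [List.filter_cons, if_neg (by simp [hf]), List.foldl_cons, if_neg (by simp [hf])]
      exact ih acc

-- the rank loop from a concrete best: first entry attaining the minimum rank wins
theorem pv_G_some :
    ∀ (u : List (String × Int × Int)) (k0 : String) (r0 rstar : Int),
      rstar ≤ r0 → (∀ y ∈ u, rstar ≤ y.2.2) → (rstar = r0 ∨ ∃ y ∈ u, y.2.2 = rstar) →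
      u.foldl (fun (acc : Option (String × Int)) kv =>
        if (match acc with | none => true | some b => decide (kv.2.2 < b.2)) then
          some (kv.1, kv.2.2)
        else acc) (some (k0, r0)) =
      (if rstar < r0 then
        ((u.filter (fun x => x.2.2 == rstar)).head?.map (fun c => (c.1, c.2.2)))
       else some (k0, r0)) := by
  intro u
  induction u with
  | nil =>
    intro k0 r0 rstar hle _ hatt
    rcases hatt with rfl | ⟨y, hy, _⟩
    · simp
    · exact absurd hy (List.not_mem_nil)
  | cons x t ih =>
    intro k0 r0 rstar hle hall hatt
    have hxr : rstar ≤ x.2.2 := hall x (by simp)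
    by_cases hstar : rstar < r0
    · -- a strictly better entry exists somewhere in x :: t
      by_cases hx : x.2.2 = rstar
      · -- x itself attains the minimum: it is taken and never displaced
        have hupd : x.2.2 < r0 := hx ▸ hstar
        have := ih x.1 x.2.2 rstar (le_of_eq hx.symm) (fun y hy => hall y (by simp [hy]))
          (Or.inl hx.symm)
        simp only [List.foldl_cons, hupd, decide_true, if_true]
        rw [this]
        simp [hx, hstar]
      · -- x does not attain the minimum; the minimum is attained later
        have hatt' : ∃ y ∈ t, y.2.2 = rstar := by
          rcases hatt with rfl | ⟨y, hy, hyr⟩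
          · exact absurd hstar (lt_irrefl _)
          · rcases List.mem_cons.mp hy with rfl | hy
            · exact absurd hyr hx
            · exact ⟨y, hy, hyr⟩
        have hxne : (x.2.2 == rstar) = false := by simp [hx]
        by_cases hupd : x.2.2 < r0
        · have := ih x.1 x.2.2 rstar hxr (fun y hy => hall y (by simp [hy])) (Or.inr hatt')
          have hs' : rstar < x.2.2 := lt_of_le_of_ne hxr (fun h => hx h.symm)
          simp only [List.foldl_cons, hupd, decide_true, if_true]
          rw [this]
          simp [hxne, hs', hstar]
        · have := ih k0 r0 rstar hle (fun y hy => hall y (by simp [hy])) (Or.inr hatt')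
          simp only [List.foldl_cons, hupd, decide_false, Bool.false_eq_true, if_false]
          rw [this]
          simp [hxne, hstar]
    · -- the current best already attains the minimum: nothing changes
      have hr0 : rstar = r0 := le_antisymm hle (le_of_not_gt hstar)
      have hnone : ∀ y ∈ t, ¬ (y.2.2 < r0) := fun y hy =>
        not_lt_of_ge (hr0 ▸ hall y (by simp [hy]))
      have hxno : ¬ (x.2.2 < r0) := not_lt_of_ge (hr0 ▸ hxr)
      have := ih k0 r0 rstar hle (fun y hy => hall y (by simp [hy])) (Or.inl hr0)
      simp only [List.foldl_cons, hxno, decide_false, Bool.false_eq_true, if_false]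
      rw [this]
      simp [hstar]

-- the rank loop from scratch
theorem pv_G_none (g : List (String × Int × Int)) (rstar : Int)
    (hmin : ∀ y ∈ g, rstar ≤ y.2.2) (hatt : ∃ y ∈ g, y.2.2 = rstar) :
    g.foldl (fun (acc : Option (String × Int)) kv =>
        if (match acc with | none => true | some b => decide (kv.2.2 < b.2)) then
          some (kv.1, kv.2.2)
        else acc) none =
      (g.filter (fun x => x.2.2 == rstar)).head?.map (fun c => (c.1, c.2.2)) := by
  cases g with
  | nil => simp at hatt
  | cons x t =>
    have hxr : rstar ≤ x.2.2 := hmin x (by simp)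
    have hstep := pv_G_some t x.1 x.2.2 rstar hxr (fun y hy => hmin y (by simp [hy])) ?hatt'
    case hatt' =>
      rcases hatt with ⟨y, hy, hyr⟩
      rcases List.mem_cons.mp hy with rfl | hy
      · exact Or.inl hyr.symm
      · exact Or.inr ⟨y, hy, hyr⟩
    simp only [List.foldl_cons, if_true]
    rw [hstep]
    by_cases hx : x.2.2 = rstar
    · simp [hx]
    · have hs : rstar < x.2.2 := lt_of_le_of_ne hxr (fun h => hx h.symm)
      simp [hx, hs]

-- ===== VERDICT (by name: the statement is the Claim_ definition above) =====
theorem lowest_key_by_frequency_and_rank_spec : Claim_equal_lowest_key_by_frequency_and_rank := by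
  intro dic _
  unfold Spec_lowest_key_by_frequency_and_rank
  cases dic with
  | none => rfl
  | some l =>
    cases l with
    | nil => rfl
    | cons a t =>
      have hlnil : (a :: t) ≠ [] := by simp
      have hmap : (a :: t).map (fun kd => (kd.1, kd.2.1, kd.2.2)) = a :: t := by simp
      obtain ⟨m, s, hs1⟩ : ∃ m s, PySem.List.sorted (a :: t) (fun x => x.2.1) false = m :: s := by
        cases h : PySem.List.sorted (a :: t) (fun x => x.2.1) false with
        | nil => exact absurd ((PySem.List.sorted_eq_nil_iff _ _ _).mp h) hlnil
        | cons m s => exact ⟨m, s, rfl⟩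
      have hm_mem : m ∈ (a :: t) := by
        have : m ∈ PySem.List.sorted (a :: t) (fun x => x.2.1) false := by rw [hs1]; simp
        exact (PySem.List.mem_sorted _ _ _ _).mp this
      have hm_min : ∀ y ∈ (a :: t), m.2.1 ≤ y.2.1 :=
        PySem.List.key_head_sorted_le _ _ hs1
      have hkw : (m :: s).filter (fun x => x.2.1 == m.2.1)
          = (a :: t).filter (fun x => x.2.1 == m.2.1) := by
        have := pv_filter_sorted (fun (x : String × Int × Int) => x.2.1) m.2.1 (a :: t)
        rw [hs1] at this
        exact this
      have hmkw : m ∈ (a :: t).filter (fun x => x.2.1 == m.2.1) := by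
        simp [List.mem_filter, hm_mem]
      have hkwnil : (a :: t).filter (fun x => x.2.1 == m.2.1) ≠ [] := by
        intro h; rw [h] at hmkw; exact absurd hmkw (List.not_mem_nil)
      obtain ⟨m2, s2, hs2⟩ : ∃ m2 s2,
          PySem.List.sorted ((a :: t).filter (fun x => x.2.1 == m.2.1)) (fun x => x.2.2) false
            = m2 :: s2 := by
        cases h : PySem.List.sorted ((a :: t).filter (fun x => x.2.1 == m.2.1)) (fun x => x.2.2) false with
        | nil => exact absurd ((PySem.List.sorted_eq_nil_iff _ _ _).mp h) hkwnil
        | cons m2 s2 => exact ⟨m2, s2, rfl⟩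
      have hm2_mem : m2 ∈ (a :: t).filter (fun x => x.2.1 == m.2.1) := by
        have : m2 ∈ PySem.List.sorted ((a :: t).filter (fun x => x.2.1 == m.2.1)) (fun x => x.2.2) false := by
          rw [hs2]; simp
        exact (PySem.List.mem_sorted _ _ _ _).mp this
      have hm2_min : ∀ y ∈ (a :: t).filter (fun x => x.2.1 == m.2.1), m2.2.2 ≤ y.2.2 :=
        PySem.List.key_head_sorted_le _ _ hs2
      -- head of A's second sort, as the head of a filter of the original class
      have hfs := pv_filter_sorted (fun (x : String × Int × Int) => x.2.2) m2.2.2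
        ((a :: t).filter (fun x => x.2.1 == m.2.1))
      rw [hs2] at hfs
      have hhead : (((a :: t).filter (fun x => x.2.1 == m.2.1)).filter
          (fun x => x.2.2 == m2.2.2)).head? = some m2 := by
        rw [← hfs, List.filter_cons, if_pos (by simp)]
        rfl
      -- A's value
      have hA : lowest_key_by_frequency_and_rank (some (a :: t)) = some m2.1 := by
        simp only [lowest_key_by_frequency_and_rank]
        rw [if_neg (by simp), hmap, hs1]
        have hg1 : PySem.List.pyGet? (m :: s) 0 = some m := by
          simp [PySem.List.pyGet?, PySem.List.pyIdx?]
        rw [hg1]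
        simp only [hkw, hs2]
        simp [PySem.List.pyGet?, PySem.List.pyIdx?]
      -- B's first loop computes some fstar, the minimum frequency
      have h1 : (a :: t).foldl (fun (acc : Option Int) kv =>
          match acc with
          | none => some kv.2.1
          | some m => if kv.2.1 < m then some kv.2.1 else acc) none
          = some (t.foldl (fun m kv => if kv.2.1 < m then kv.2.1 else m) a.2.1) := by
        rw [List.foldl_cons]
        exact pv_optfold t a.2.1
      rcases pv_minfold t a.2.1 with ⟨hfmem, hfle, hfall⟩
      have hf_eq : t.foldl (fun m kv => if kv.2.1 < m then kv.2.1 else m) a.2.1 = m.2.1 := by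
        apply le_antisymm
        · rcases List.mem_cons.mp hm_mem with rfl | hm
          · exact hfle
          · exact hfall m hm
        · rcases hfmem with he | ⟨y, hy, he⟩
          · rw [he]; exact hm_min a (by simp)
          · rw [he]; exact hm_min y (by simp [hy])
      -- B's value
      have hB : lowest_key_by_frequency_and_rank_alt (some (a :: t)) = some m2.1 := by
        simp only [lowest_key_by_frequency_and_rank_alt]
        rw [if_neg (by simp), h1, hf_eq,
          pv_fold2_filter m.2.1 (a :: t) none,
          pv_G_none ((a :: t).filter (fun x => x.2.1 == m.2.1)) m2.2.2 hm2_min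
            ⟨m2, hm2_mem, rfl⟩,
          hhead]
        rfl
      rw [hA, hB]
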